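-- pv_equiv track=rewrite | github.com/eggsacc/CS1010X-2025 | Practical exam/PE 2017/cs1010x-practical-exam-solutions-2017.py | parse_keylog
-- ===== SOURCE A (Python) =====
-- def parse_keylog(log):
--     left = ""
--     right = ""
--     for c in log:
--         if c == "1":
--             if left != "":
--                 right = left[-1]+right
--                 left = left[:-1]
--         elif c == "2":
--             if right != "":
--                 left += right[0]
--                 right = right[1:]
--         elif c == "3":
--             left = left[:-1]
--         else:
--             left += c
--     return left+right
-- ===== SOURCE B (Python) =====
-- def parse_keylog(log):
--     # Run-length batched replay on a single buffer with an integer cursor: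
--     # group the log into maximal runs of equal characters and apply each run
--     # as one bulk operation (cursor jump, block delete, block insert).
--     buf = []
--     pos = 0
--     i = 0
--     n = len(log)
--     while i < n:
--         c = log[i]
--         j = i
--         while j < n and log[j] == c:
--             j += 1
--         m = j - i
--         if c == "1":
--             pos = max(pos - m, 0)
--         elif c == "2":
--             pos = min(pos + m, len(buf))
--         elif c == "3":
--             cut = max(pos - m, 0)
--             del buf[cut:pos]
--             pos = cut
--         else:
--             buf[pos:pos] = c * m
--             pos += m
--         i = j
--     return "".join(buf)
-- ===== Notes on version B (the rewrite author's own statement) =====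
-- stated objective: alternative
-- what changed: Replaced the per-character two-string cursor simulation with a staged run-length replay: the log is first grouped into maximal runs of equal keys, and each run is applied as one bulk operation (cursor jump by m, block delete of m chars, block insert of c*m) on a single buffer with an integer cursor.
import Mathlib
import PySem

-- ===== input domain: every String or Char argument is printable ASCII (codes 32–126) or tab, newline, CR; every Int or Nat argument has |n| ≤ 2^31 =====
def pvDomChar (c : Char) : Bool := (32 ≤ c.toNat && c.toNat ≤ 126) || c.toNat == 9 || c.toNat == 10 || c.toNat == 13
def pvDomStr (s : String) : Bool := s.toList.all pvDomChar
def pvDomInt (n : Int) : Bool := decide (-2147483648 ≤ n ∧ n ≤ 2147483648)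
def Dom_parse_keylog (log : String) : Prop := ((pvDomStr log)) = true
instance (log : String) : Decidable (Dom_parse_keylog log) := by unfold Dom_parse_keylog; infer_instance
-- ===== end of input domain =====

-- B replaces A's per-character two-string cursor simulation by a staged run-length
-- replay: group the log into maximal runs of equal keys, then apply each run as one
-- bulk operation on a single buffer with an integer cursor.

-- ===== PORT A =====
-- A's strings left/right are modelled as List Char; left[-1] = getLastD (guarded by
-- left ≠ ""), left[:-1] = dropLast (Python's [:-1] on "" is ""), right[0] = headD
-- (guarded), right[1:] = tail, += is append at the end.
def parse_keylog_stepA (st : List Char × List Char) (c : Char) : List Char × List Char :=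
  if c = '1' then
    if st.1 ≠ [] then (st.1.dropLast, st.1.getLastD ' ' :: st.2) else st
  else if c = '2' then
    if st.2 ≠ [] then (st.1 ++ [st.2.headD ' '], st.2.tail) else st
  else if c = '3' then (st.1.dropLast, st.2)
  else (st.1 ++ [c], st.2)

def parse_keylog (log : String) : String :=
  let st := log.toList.foldl parse_keylog_stepA ([], [])
  String.mk (st.1 ++ st.2)

-- ===== PORT B =====
-- Source B's inner grouping while-loop = span on the list; runs returns (char, run length).
def parse_keylog_runs (cs : List Char) : List (Char × Nat) :=
  match cs with
  | [] => []
  | c :: cs' =>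
      let t := cs'.takeWhile (· = c)
      (c, t.length + 1) :: parse_keylog_runs (cs'.dropWhile (· = c))
termination_by cs.length
decreasing_by
  simp only [List.length_cons]
  exact Nat.lt_succ_of_le (cs'.length_dropWhile_le _)

-- pos is a Nat; Python's max(pos - m, 0) is Nat truncated subtraction, min(pos+m,len) is min;
-- del buf[cut:pos] (cut ≤ pos) = take cut ++ drop pos; buf[pos:pos] = c*m is a block insert.
def parse_keylog_stepB (st : List Char × Nat) (run : Char × Nat) : List Char × Nat :=
  if run.1 = '1' then (st.1, st.2 - run.2)
  else if run.1 = '2' then (st.1, min (st.2 + run.2) st.1.length)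
  else if run.1 = '3' then (st.1.take (st.2 - run.2) ++ st.1.drop st.2, st.2 - run.2)
  else (st.1.take st.2 ++ List.replicate run.2 run.1 ++ st.1.drop st.2, st.2 + run.2)

def parse_keylog_alt (log : String) : String :=
  String.mk ((parse_keylog_runs log.toList).foldl parse_keylog_stepB ([], 0)).1

-- ===== PRECONDITION & SPEC =====
def Spec_parse_keylog (log : String) (out : String) : Prop := out = parse_keylog_alt log
instance (log : String) (out : String) : Decidable (Spec_parse_keylog log out) := by unfold Spec_parse_keylog; infer_instance

-- ===== CLAIM (what is proved, stated in full; the proofs are below) =====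
def Claim_equal_parse_keylog : Prop := ∀ (log : String), Dom_parse_keylog log → Spec_parse_keylog log (parse_keylog log)

-- ===== LEMMAS AND PROOFS =====

-- Folding A's step over a run of m copies of each control key, in closed form.
theorem foldA_ones (m : Nat) : ∀ (l r : List Char),
    (List.replicate m '1').foldl parse_keylog_stepA (l, r)
      = (l.take (l.length - m), l.drop (l.length - m) ++ r) := by
  induction m with
  | zero => intro l r; simp
  | succ m ih =>
      intro l r
      rw [List.replicate_succ, List.foldl_cons]
      induction l using List.reverseRecOn with
      | nil => simpa using ih [] r
      | append_singleton ys y _ =>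
          have h1 : parse_keylog_stepA (ys ++ [y], r) '1' = (ys, y :: r) := by
            simp [parse_keylog_stepA]
          rw [h1, ih ys (y :: r)]
          have hk : ys.length - m ≤ ys.length := Nat.sub_le _ _
          have hlen : (ys ++ [y]).length - (m + 1) = ys.length - m := by
            simp
          rw [hlen, List.take_append_of_le_length hk, List.drop_append_of_le_length hk]
          simp

theorem foldA_twos (m : Nat) : ∀ (l r : List Char),
    (List.replicate m '2').foldl parse_keylog_stepA (l, r)
      = (l ++ r.take m, r.drop m) := by
  induction m with
  | zero => intro l r; simp
  | succ m ih =>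
      intro l r
      rw [List.replicate_succ, List.foldl_cons]
      cases r with
      | nil => simpa [parse_keylog_stepA] using ih l []
      | cons y ys =>
          have h1 : parse_keylog_stepA (l, y :: ys) '2' = (l ++ [y], ys) := by
            simp [parse_keylog_stepA]
          rw [h1, ih (l ++ [y]) ys]
          simp

theorem foldA_threes (m : Nat) : ∀ (l r : List Char),
    (List.replicate m '3').foldl parse_keylog_stepA (l, r)
      = (l.take (l.length - m), r) := by
  induction m with
  | zero => intro l r; simp
  | succ m ih =>
      intro l r
      rw [List.replicate_succ, List.foldl_cons]
      induction l using List.reverseRecOn with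
      | nil => simpa [parse_keylog_stepA] using ih [] r
      | append_singleton ys y _ =>
          have h1 : parse_keylog_stepA (ys ++ [y], r) '3' = (ys, r) := by
            simp [parse_keylog_stepA]
          rw [h1, ih ys r]
          have hk : ys.length - m ≤ ys.length := Nat.sub_le _ _
          have hlen : (ys ++ [y]).length - (m + 1) = ys.length - m := by
            simp
          rw [hlen, List.take_append_of_le_length hk]

theorem foldA_text (c : Char) (hc1 : c ≠ '1') (hc2 : c ≠ '2') (hc3 : c ≠ '3')
    (m : Nat) : ∀ (l r : List Char),
    (List.replicate m c).foldl parse_keylog_stepA (l, r)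
      = (l ++ List.replicate m c, r) := by
  induction m with
  | zero => intro l r; simp
  | succ m ih =>
      intro l r
      rw [List.replicate_succ, List.foldl_cons]
      have h1 : parse_keylog_stepA (l, r) c = (l ++ [c], r) := by
        simp [parse_keylog_stepA, hc1, hc2, hc3]
      rw [h1, ih (l ++ [c]) r]
      simp

-- One bulk B-step on the joined buffer equals folding A's step over the whole run.
theorem stepB_corr (l r : List Char) (c : Char) (m : Nat) :
    parse_keylog_stepB (l ++ r, l.length) (c, m)
      = (((List.replicate m c).foldl parse_keylog_stepA (l, r)).1 ++
         ((List.replicate m c).foldl parse_keylog_stepA (l, r)).2,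
         ((List.replicate m c).foldl parse_keylog_stepA (l, r)).1.length) := by
  by_cases h1 : c = '1'
  · subst h1
    rw [foldA_ones]
    have hk : l.length - m ≤ l.length := Nat.sub_le _ _
    simp only [parse_keylog_stepB]
    refine Prod.ext ?_ ?_
    · simp [← List.append_assoc]
    · simp [List.length_take]
  · by_cases h2 : c = '2'
    · subst h2
      rw [foldA_twos]
      simp only [parse_keylog_stepB, h1]
      refine Prod.ext ?_ ?_
      · simp [List.append_assoc]
      · simp
    · by_cases h3 : c = '3'
      · subst h3
        rw [foldA_threes]
        have hk : l.length - m ≤ l.length := Nat.sub_le _ _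
        simp only [parse_keylog_stepB, h1, h2]
        refine Prod.ext ?_ ?_
        · simp [List.take_append_of_le_length hk]
        · simp [List.length_take]
      · rw [foldA_text c h1 h2 h3]
        simp [parse_keylog_stepB, h1, h2, h3]

-- Every element of takeWhile (· = c) equals c, so the run is a replicate.
theorem takeWhile_eq_replicate (c : Char) (cs : List Char) :
    cs.takeWhile (· = c) = List.replicate (cs.takeWhile (· = c)).length c := by
  apply List.eq_replicate_of_mem
  intro b hb
  have := List.mem_takeWhile_imp hb
  simpa using this

-- Folding B's bulk steps over the runs equals folding A's step over the characters.
theorem fold_runs_corr : ∀ (cs l r : List Char),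
    (parse_keylog_runs cs).foldl parse_keylog_stepB (l ++ r, l.length)
      = ((cs.foldl parse_keylog_stepA (l, r)).1 ++ (cs.foldl parse_keylog_stepA (l, r)).2,
         (cs.foldl parse_keylog_stepA (l, r)).1.length) := by
  intro cs
  induction cs using parse_keylog_runs.induct with
  | case1 => intro l r; simp [parse_keylog_runs]
  | case2 c cs' ih =>
      intro l r
      rw [parse_keylog_runs]
      rw [List.foldl_cons, stepB_corr]
      have hsplit : c :: cs' = List.replicate ((cs'.takeWhile (· = c)).length + 1) c
          ++ cs'.dropWhile (· = c) := by
        rw [List.replicate_succ, List.cons_append]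
        congr 1
        conv_lhs => rw [← List.takeWhile_append_dropWhile (p := (· = c)) (l := cs')]
        congr 1
        exact takeWhile_eq_replicate c cs'
      conv_rhs => rw [hsplit]
      rw [List.foldl_append]
      exact ih _ _

-- ===== VERDICT (by name: the statement is the Claim_ definition above) =====
theorem parse_keylog_spec : Claim_equal_parse_keylog := by
  intro log _
  unfold Spec_parse_keylog parse_keylog parse_keylog_alt
  have h := fold_runs_corr log.toList [] []
  simp only [List.nil_append, List.length_nil] at h
  rw [h]
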